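-- pv_equiv track=rewrite | github.com/secom-cca/river_management | nash_equilibrium_bayesian.py | all_pure_strategies
-- ===== SOURCE A (Python) =====
-- import itertools
--
-- def all_pure_strategies(actions, types):
--     """
--     Return a list of all functions from 'types' to 'actions'.
--     Represented as a dict: {t: a, ...} or a tuple in some canonical order.
--     """
--     # For 2 types & 3 actions, we have 3^2=9 possible strategy functions.
--     # We'll yield them as dictionaries: {type -> action}
--     all_strats = []
--     for mapping in itertools.product(actions, repeat=len(types)):
--         # mapping is a tuple like ('NP','IL') meaning T1->NP, T2->IL
--         strategy_dict = {}
--         for i, t in enumerate(types):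
--             strategy_dict[t] = mapping[i]
--         all_strats.append(strategy_dict)
--     return all_strats
-- ===== SOURCE B (Python) =====
-- def all_pure_strategies(actions, types):
--     """
--     Return a list of all functions from 'types' to 'actions'.
--     Recursive enumeration: recurse on the tail of 'types' so the last
--     type varies fastest, then build each dict with dict(zip(...)).
--     """
--     def assigns(ts):
--         if not ts:
--             return [()]
--         rest = assigns(ts[1:])
--         return [(a,) + tail for a in actions for tail in rest]
--
--     return [dict(zip(types, tup)) for tup in assigns(types)]
-- ===== Notes on version B (the rewrite author's own statement) =====
-- stated objective: simpler
-- what changed: Replaces itertools.product plus a per-tuple index loop that inserts keys one by one with a recursive enumeration over the tail of 'types' and a direct dict(zip(types, tup)) per tuple.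
import Mathlib
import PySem

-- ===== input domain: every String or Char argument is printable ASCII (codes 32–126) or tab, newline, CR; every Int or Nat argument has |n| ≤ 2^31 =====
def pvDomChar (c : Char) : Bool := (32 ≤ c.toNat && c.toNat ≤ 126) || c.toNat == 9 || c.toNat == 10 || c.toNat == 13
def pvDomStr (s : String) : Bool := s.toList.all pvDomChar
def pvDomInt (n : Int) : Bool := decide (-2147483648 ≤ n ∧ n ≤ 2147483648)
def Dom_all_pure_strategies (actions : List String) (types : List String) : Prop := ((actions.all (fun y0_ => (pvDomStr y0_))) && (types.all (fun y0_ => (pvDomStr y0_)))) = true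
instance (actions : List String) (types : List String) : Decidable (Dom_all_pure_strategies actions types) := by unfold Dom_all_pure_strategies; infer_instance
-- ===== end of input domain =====

-- B replaces A's iterative itertools.product + per-index dict-building loop by a
-- recursive enumeration over the tail of `types` and dict(zip(...)) per tuple
-- (objective: simpler / more direct decomposition; same asymptotic cost).

-- ===== PORT A =====
-- itertools.product(actions, repeat=n), ported by its documented iterative expansion:
-- result = [[]]; for _ in range(n): result = [t + [a] for t in result for a in actions]
def pvProductRepeat (actions : List String) (n : Nat) : List (List String) :=
  (List.range n).foldl
    (fun acc _ => acc.flatMap (fun t => actions.map (fun a => t ++ [a]))) [[]]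

def all_pure_strategies (actions : List String) (types : List String) : List (List (String × String)) :=
  (pvProductRepeat actions types.length).foldl
    (fun all_strats mapping =>
      all_strats ++
        [((PySem.List.enumerate types).foldl
            (fun d (p : Int × String) => d.insert p.2 (PySem.List.pyGetD mapping p.1 ""))
            (PySem.Dict.empty : PySem.Dict String String)).items])
    []

-- ===== PORT B =====
-- assigns(ts): all assignment tuples, recursing on the tail of ts (last type varies fastest)
def pvAssigns (actions : List String) : List String → List (List String)
  | [] => [[]]
  | _ :: rest => actions.flatMap (fun a => (pvAssigns actions rest).map (fun tail => a :: tail))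

def all_pure_strategies_alt (actions : List String) (types : List String) : List (List (String × String)) :=
  (pvAssigns actions types).map (fun tup => (PySem.Dict.ofList (types.zip tup)).items)

-- ===== PRECONDITION & SPEC =====
def Spec_all_pure_strategies (actions : List String) (types : List String) (out : List (List (String × String))) : Prop := out = all_pure_strategies_alt actions types
instance (actions : List String) (types : List String) (out : List (List (String × String))) : Decidable (Spec_all_pure_strategies actions types out) := by unfold Spec_all_pure_strategies; infer_instance

-- ===== CLAIM (what is proved, stated in full; the proofs are below) =====
def Claim_equal_all_pure_strategies : Prop := ∀ (actions : List String) (types : List String), Dom_all_pure_strategies actions types → Spec_all_pure_strategies actions types (all_pure_strategies actions types)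

-- ===== LEMMAS AND PROOFS =====

-- every tuple produced by pvAssigns has the length of the type list
theorem pvAssigns_length {actions : List String} : ∀ (ts : List String) (tup : List String),
    tup ∈ pvAssigns actions ts → tup.length = ts.length := by
  intro ts
  induction ts with
  | nil => intro tup h; simp [pvAssigns] at h; simp [h]
  | cons t ts ih =>
    intro tup h
    simp only [pvAssigns, List.mem_flatMap, List.mem_map] at h
    obtain ⟨a, _, tail, htail, rfl⟩ := h
    simp [ih tail htail]

-- growing the tuples on the right (A's iteration) equals growing on the left (B's recursion)
theorem pvAssigns_snoc {actions : List String} : ∀ (ts : List String) (t : String),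
    pvAssigns actions (ts ++ [t])
      = (pvAssigns actions ts).flatMap (fun tup => actions.map (fun a => tup ++ [a])) := by
  intro ts
  induction ts with
  | nil =>
    intro t
    simp [pvAssigns, List.map_eq_flatMap]
  | cons u ts ih =>
    intro t
    simp only [List.cons_append, pvAssigns, ih t]
    simp [List.flatMap_assoc, List.flatMap_map, List.map_flatMap, List.map_map, Function.comp_def]

-- A's iterative product equals B's recursive enumeration
theorem pvProduct_eq_assigns (actions : List String) : ∀ (ts : List String),
    pvProductRepeat actions ts.length = pvAssigns actions ts := by
  intro ts
  induction ts using List.reverseRecOn with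
  | nil => simp [pvProductRepeat, pvAssigns]
  | append_singleton ts t ih =>
    have : pvProductRepeat actions (ts ++ [t]).length
        = (pvProductRepeat actions ts.length).flatMap
            (fun tup => actions.map (fun a => tup ++ [a])) := by
      simp only [pvProductRepeat, List.length_append, List.length_cons, List.length_nil,
        List.range_succ, List.foldl_append, List.foldl_cons, List.foldl_nil]
    rw [this, ih, pvAssigns_snoc]

-- A's per-tuple dict-building loop (enumerate + indexing) equals a fold over zip
theorem enumFold_eq_zipFold : ∀ (ts : List String) (m : List String) (s : Nat)
    (d : PySem.Dict String String), s + ts.length ≤ m.length →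
    (PySem.List.enumerate ts (s : Int)).foldl
        (fun d (p : Int × String) => d.insert p.2 (PySem.List.pyGetD m p.1 "")) d
      = (ts.zip (m.drop s)).foldl (fun d p => d.insert p.1 p.2) d := by
  intro ts
  induction ts with
  | nil => intro m s d _; simp [PySem.List.enumerate_nil]
  | cons t ts ih =>
    intro m s d hlen
    have hs : s < m.length := by simp at hlen; omega
    have hdrop : m.drop s = m[s] :: m.drop (s + 1) := List.drop_eq_getElem_cons hs
    have hget : PySem.List.pyGetD m (s : Int) "" = m[s] := by
      rw [PySem.List.pyGetD_natCast]; exact List.getD_eq_getElem m "" hs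
    rw [PySem.List.enumerate_cons, hdrop]
    simp only [List.foldl_cons, List.zip_cons_cons, hget]
    have hcast : ((s : Int) + 1) = ((s + 1 : Nat) : Int) := by push_cast; ring
    rw [hcast, ih m (s + 1) _ (by simp at hlen ⊢; omega)]

-- ===== VERDICT (by name: the statement is the Claim_ definition above) =====
theorem all_pure_strategies_spec : Claim_equal_all_pure_strategies := by
  intro actions types _
  unfold Spec_all_pure_strategies all_pure_strategies all_pure_strategies_alt
  rw [pvProduct_eq_assigns, PySem.List.foldl_append_singleton_eq_map]
  simp only [List.nil_append]
  apply List.map_congr_left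
  intro tup htup
  have hlen : tup.length = types.length := pvAssigns_length types tup htup
  have := enumFold_eq_zipFold types tup 0 (PySem.Dict.empty) (by omega)
  simp only [Nat.cast_zero, List.drop_zero] at this
  rw [this]
  rfl
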